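-- pv_equiv track=rewrite | github.com/Chris7/pyquant | pyquant/utils.py | find_next_scan
-- ===== SOURCE A (Python) =====
-- def find_next_scan(msn_map, current_scan, ms_level=None):
--     scan_found = False
--     for scan_msn, scan_id in msn_map:
--         if scan_found:
--             if ms_level is None:
--                 return scan_id
--             elif scan_msn == ms_level:
--                 return scan_id
--         if not scan_found and scan_id == current_scan:
--             scan_found = True
--     return None
-- ===== SOURCE B (Python) =====
-- def find_next_scan(msn_map, current_scan, ms_level=None):
--     # Backwards fold: nxt = first ms_level-matching scan of the suffix already
--     # processed; ans = answer assuming the first target occurrence is at/after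
--     # the current position (earlier occurrences overwrite it later).
--     ans = None
--     nxt = None
--     for scan_msn, scan_id in reversed(msn_map):
--         if scan_id == current_scan:
--             ans = nxt
--         if ms_level is None or scan_msn == ms_level:
--             nxt = scan_id
--     return ans
-- ===== Notes on version B (the rewrite author's own statement) =====
-- stated objective: alternative
-- what changed: Replaces A's forward scan with a scan_found flag by a single backwards fold carrying two accumulators: nxt, the first ms_level-matching scan of the suffix seen so far, and ans, overwritten with nxt at each target occurrence so the earliest occurrence wins; no flag and no forward search remain.
import Mathlib
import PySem

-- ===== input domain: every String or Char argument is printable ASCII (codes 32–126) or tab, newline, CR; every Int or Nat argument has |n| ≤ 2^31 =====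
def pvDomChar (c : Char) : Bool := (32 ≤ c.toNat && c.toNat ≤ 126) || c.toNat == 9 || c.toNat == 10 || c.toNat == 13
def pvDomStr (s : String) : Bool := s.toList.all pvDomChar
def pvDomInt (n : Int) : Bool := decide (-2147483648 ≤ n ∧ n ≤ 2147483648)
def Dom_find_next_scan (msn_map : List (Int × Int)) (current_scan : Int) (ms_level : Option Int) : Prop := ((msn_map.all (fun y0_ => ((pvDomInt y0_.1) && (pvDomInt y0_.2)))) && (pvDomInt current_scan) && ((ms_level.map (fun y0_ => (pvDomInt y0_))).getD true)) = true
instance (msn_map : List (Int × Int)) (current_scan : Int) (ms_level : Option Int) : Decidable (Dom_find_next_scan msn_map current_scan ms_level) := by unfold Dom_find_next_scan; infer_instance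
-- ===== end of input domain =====

-- B replaces A's forward scan_found state machine with a backwards fold over the list,
-- carrying two accumulators (first matching scan of the suffix; current answer). Objective: alternative.

-- ===== PORT A =====
-- the for-loop of A, with scan_found carried as state
def fnsLoopA (current_scan : Int) (ms_level : Option Int) : List (Int × Int) → Bool → Option Int
  | [], _ => none
  | (scan_msn, scan_id) :: rest, scan_found =>
    if scan_found then
      match ms_level with
      | none => some scan_id
      | some l => if scan_msn = l then some scan_id else fnsLoopA current_scan ms_level rest scan_found
    else
      if scan_id = current_scan then fnsLoopA current_scan ms_level rest true
      else fnsLoopA current_scan ms_level rest scan_found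

def find_next_scan (msn_map : List (Int × Int)) (current_scan : Int) (ms_level : Option Int) : Option Int :=
  fnsLoopA current_scan ms_level msn_map false

-- ===== PORT B =====
-- B's reversed for-loop: structural recursion from the back of the list, returning (ans, nxt)
def fnsFoldB (current_scan : Int) (ms_level : Option Int) : List (Int × Int) → Option Int × Option Int
  | [] => (none, none)
  | (scan_msn, scan_id) :: rest =>
    let p := fnsFoldB current_scan ms_level rest
    let ans := if scan_id = current_scan then p.2 else p.1
    let nxt := if ms_level = none ∨ ms_level = some scan_msn then some scan_id else p.2
    (ans, nxt)

def find_next_scan_alt (msn_map : List (Int × Int)) (current_scan : Int) (ms_level : Option Int) : Option Int :=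
  (fnsFoldB current_scan ms_level msn_map).1

-- ===== PRECONDITION & SPEC =====
def Spec_find_next_scan (msn_map : List (Int × Int)) (current_scan : Int) (ms_level : Option Int) (out : Option Int) : Prop := out = find_next_scan_alt msn_map current_scan ms_level
instance (msn_map : List (Int × Int)) (current_scan : Int) (ms_level : Option Int) (out : Option Int) : Decidable (Spec_find_next_scan msn_map current_scan ms_level out) := by unfold Spec_find_next_scan; infer_instance

-- ===== CLAIM (what is proved, stated in full; the proofs are below) =====
def Claim_equal_find_next_scan : Prop := ∀ (msn_map : List (Int × Int)) (current_scan : Int) (ms_level : Option Int), Dom_find_next_scan msn_map current_scan ms_level → Spec_find_next_scan msn_map current_scan ms_level (find_next_scan msn_map current_scan ms_level)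

-- ===== LEMMAS AND PROOFS =====
lemma foldB_eq (c : Int) (l : Option Int) (xs : List (Int × Int)) :
    fnsFoldB c l xs = (fnsLoopA c l xs false, fnsLoopA c l xs true) := by
  induction xs with
  | nil => rfl
  | cons p rest ih =>
    obtain ⟨m, s⟩ := p
    cases l with
    | none =>
      by_cases hs : s = c <;> simp [fnsFoldB, fnsLoopA, ih, hs]
    | some v =>
      by_cases hm : m = v
      · by_cases hs : s = c <;>
          simp [fnsFoldB, fnsLoopA, ih, hs, hm]
      · by_cases hs : s = c <;>
          simp [fnsFoldB, fnsLoopA, ih, hs, hm] <;>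
          exact fun h => absurd h.symm hm

-- ===== VERDICT (by name: the statement is the Claim_ definition above) =====
theorem find_next_scan_spec : Claim_equal_find_next_scan := by
  intro m c l _
  show _ = _
  simp [find_next_scan, find_next_scan_alt, foldB_eq]
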